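-- pv_equiv track=rewrite | github.com/H-SG/aoc-python-2024 | day04.py | rotate_string_list_45
-- ===== SOURCE A (Python) =====
-- def rotate_string_list_45(input: list[str]) -> list[str]:
--     rows: int = len(input)
--     l_append: int = rows * 2
--
--     output: list[str] = ["" for r in range((rows * 2) -1)]
--
--     x: int = 0
--     y: int = 0
--     reduce_l_adjust: bool = True
--     for i, d in enumerate(input):
--         y = i
--         i_inv: int = (-1) - i
--         y_inv = i_inv
--
--         while y >= 0:
--             x = i - y
--             x_inv = (i_inv - 1) - y_inv
--             output[i] += input[y][x]
--             if i < len(input) - 1: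
--                 output[i_inv] += input[y_inv][x_inv]
--
--             y -= 1
--             y_inv += 1
--
--         if i < len(input) - 1:
--             output[i_inv] = output[i_inv][::-1]
--
--
--         if l_append == 0:
--             reduce_l_adjust = False
--
--         if reduce_l_adjust:
--             l_append -= 1
--         else:
--             l_append += 1
--
--     return output
-- ===== SOURCE B (Python) =====
-- def rotate_string_list_45(input: list[str]) -> list[str]:
--     n = len(input)
--     output = []
--     for k in range(2 * n - 1):
--         r = min(k, n - 1)
--         diag = []
--         while r >= 0 and k - r < n:
--             diag.append(input[r][k - r])
--             r -= 1
--         output.append("".join(diag))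
--     return output
-- ===== Notes on version B (the rewrite author's own statement) =====
-- stated objective: simpler
-- what changed: Replaces A's simultaneous forward/negative-index build of upper and lower diagonals (with a per-diagonal string reversal and dead l_append bookkeeping) by one direct pass: for each anti-diagonal k of the 2n-1 outputs, walk the valid cells r+c=k in decreasing-row order and append input[r][k-r].
-- outside the precondition, e.g. on rotate_string_list_45(['ab', 'c']): A returns ['a', 'cb', 'c'], B raises IndexError; on rotate_string_list_45(['abcd', 'efgh']): A returns ['a', 'eb', 'h'], B returns ['a', 'eb', 'f']
import Mathlib
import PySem

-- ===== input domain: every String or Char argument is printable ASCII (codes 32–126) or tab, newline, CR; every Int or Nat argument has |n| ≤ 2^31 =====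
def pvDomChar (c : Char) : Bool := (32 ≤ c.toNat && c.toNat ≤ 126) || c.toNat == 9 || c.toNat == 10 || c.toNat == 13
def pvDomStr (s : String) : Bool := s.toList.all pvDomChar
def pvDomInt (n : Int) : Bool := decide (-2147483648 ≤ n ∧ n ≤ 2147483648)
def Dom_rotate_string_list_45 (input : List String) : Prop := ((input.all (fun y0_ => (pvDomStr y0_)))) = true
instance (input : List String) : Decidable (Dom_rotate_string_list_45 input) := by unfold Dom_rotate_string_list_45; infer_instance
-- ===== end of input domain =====

-- B rewrites A's simultaneous forward/negative-index diagonal build (with per-diagonal reversal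
-- and dead l_append state) as one direct decreasing-row walk per anti-diagonal ('simpler').

-- ===== PORT A =====
-- Strings are ported through List Char (PySem convention).
-- input[y][x] with Python (possibly negative) indexing; total getD form, exact whenever the
-- indices are in range — which Pre_ guarantees for every access A performs.
def pvGetCh (inp : List (List Char)) (y x : Int) : Char :=
  PySem.List.pyGetD (PySem.List.pyGetD inp y []) x '?'

-- body of A's while loop at outer index i, iteration t (so y = i - t, y_inv = -1 - i + t)
def pvAStep (inp : List (List Char)) (n i : Nat) (out : List (List Char)) (t : Nat) :
    List (List Char) :=
  let y : Int := (i : Int) - (t : Int)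
  let iInv : Int := -1 - (i : Int)
  let yInv : Int := iInv + (t : Int)
  let x : Int := (i : Int) - y
  let xInv : Int := (iInv - 1) - yInv
  let out1 := PySem.List.pySetD out (i : Int)
      (PySem.List.pyGetD out (i : Int) [] ++ [pvGetCh inp y x])
  if i < n - 1 then
    PySem.List.pySetD out1 iInv
      (PySem.List.pyGetD out1 iInv [] ++ [pvGetCh inp yInv xInv])
  else out1

-- one iteration of A's outer 'for i, d in enumerate(input)' (d is only used for enumeration;
-- l_append / reduce_l_adjust are dead state in A — written every iteration, never read)
def pvAOuter (inp : List (List Char)) (n : Nat) (out : List (List Char)) (i : Nat) :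
    List (List Char) :=
  let iInv : Int := -1 - (i : Int)
  let out1 := (List.range (i + 1)).foldl (pvAStep inp n i) out
  if i < n - 1 then
    PySem.List.pySetD out1 iInv ((PySem.List.pyGetD out1 iInv []).reverse)  -- output[i_inv][::-1]
  else out1

def rotate_string_list_45 (input : List String) : List String :=
  let rows := input.length
  let inp := input.map String.toList
  let output0 : List (List Char) := (List.range (2 * rows - 1)).map (fun _ => [])
  ((List.range rows).foldl (pvAOuter inp rows) output0).map String.ofList

-- ===== PORT B =====
-- the while loop of Source B: r counts down; stop when r < 0 (structural) or k - r ≥ n.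
-- input[r][k-r] (both indices nonnegative here) in total getD form, exact in range (Pre_).
def pvBGo (inp : List (List Char)) (n k : Nat) : Nat → List Char
  | 0 => if k - 0 < n then [(inp.getD 0 []).getD (k - 0) '?'] else []
  | Nat.succ r' =>
    if k - (r' + 1) < n then
      ((inp.getD (r' + 1) []).getD (k - (r' + 1)) '?') :: pvBGo inp n k r'
    else []

def rotate_string_list_45_alt (input : List String) : List String :=
  let n := input.length
  let inp := input.map String.toList
  (List.range (2 * n - 1)).map (fun k => String.ofList (pvBGo inp n k (min k (n - 1))))

-- ===== PRECONDITION & SPEC =====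
-- Pre_ admits the trivial grids (0 or 1 rows, rows nonempty so A's single access returns) and
-- otherwise restricts to square grids: on a ragged or non-square multi-row grid the function's
-- behaviour is unspecified — A either raises IndexError partway or silently reads trailing
-- columns of over-long rows from the right edge via its negative indices, while B raises
-- IndexError or reads the left-aligned anti-diagonals.
def Pre_rotate_string_list_45 (input : List String) : Prop :=
  if input.length ≤ 1 then ∀ s ∈ input, 1 ≤ s.toList.length
  else ∀ s ∈ input, s.toList.length = input.length
instance (input : List String) : Decidable (Pre_rotate_string_list_45 input) := by
  unfold Pre_rotate_string_list_45; infer_instance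

def pvWitness_rotate_string_list_45 : List String := ["ab", "cd"]

def Spec_rotate_string_list_45 (input : List String) (out : List String) : Prop :=
  out = rotate_string_list_45_alt input
instance (input : List String) (out : List String) : Decidable (Spec_rotate_string_list_45 input out) := by
  unfold Spec_rotate_string_list_45; infer_instance

-- ===== CLAIM (what is proved, stated in full; the proofs are below) =====
def Claim_equal_rotate_string_list_45 : Prop :=
  ∀ (input : List String), Dom_rotate_string_list_45 input →
    Pre_rotate_string_list_45 input →
      Spec_rotate_string_list_45 input (rotate_string_list_45 input)

-- ===== LEMMAS AND PROOFS =====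

-- the (r,c) grid entry both ports read (total form)
def pvCh (inp : List (List Char)) (r c : Nat) : Char := (inp.getD r []).getD c '?'

-- pySetD at an in-range negative index (no PySem lemma covers this case)
theorem pvSetD_neg {α : Type} (xs : List α) (k : Nat) (v : α) (h1 : 0 < k) (h2 : k ≤ xs.length) :
    PySem.List.pySetD xs (-(k : Int)) v = xs.set (xs.length - k) v := by
  unfold PySem.List.pySetD PySem.List.pySet? PySem.List.pyIdx?
  split_ifs with h h'
  all_goals first
   | (exfalso; omega)
   | (simp only [Option.map_some, Option.getD_some]; congr 1; omega)

-- pvGetCh in terms of pvCh: the Int index names row j / column c either directly or from the end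
theorem pvGetCh_eq (inp : List (List Char)) (n : Nat) (hn : inp.length = n)
    (hsq : ∀ row ∈ inp, row.length = n)
    (y x : Int) (j c : Nat) (hj : j < n) (hc : c < n)
    (hy : y = (j : Int) ∨ y = (j : Int) - (n : Int))
    (hx : x = (c : Int) ∨ x = (c : Int) - (n : Int)) :
    pvGetCh inp y x = pvCh inp j c := by
  have hjl : j < inp.length := by omega
  have hrow : PySem.List.pyGetD inp y [] = inp[j] := by
    rcases hy with hy | hy
    · rw [hy, PySem.List.pyGetD_natCast, List.getD_eq_getElem _ _ hjl]
    · have hy' : y = -(((n - j : Nat)) : Int) := by omega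
      rw [hy', PySem.List.pyGetD_neg_natCast _ _ _ (by omega) (by omega)]
      congr 1
      omega
  have hlen : (inp[j]).length = n := hsq _ (List.getElem_mem hjl)
  have hcol : PySem.List.pyGetD inp[j] x '?' = (inp[j]).getD c '?' := by
    rcases hx with hx | hx
    · rw [hx, PySem.List.pyGetD_natCast]
    · have hx' : x = -(((n - c : Nat)) : Int) := by omega
      rw [hx', PySem.List.pyGetD_neg_natCast _ _ _ (by omega) (by omega),
        List.getD_eq_getElem _ _ (by omega)]
      congr 1
      omega
  unfold pvGetCh pvCh
  rw [hrow, hcol, List.getD_eq_getElem _ _ hjl]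

-- ----- characterising B's diagonal walk -----

-- upper diagonals k ≤ n-1: walk from row r down to row 0
theorem pvBGo_upper (inp : List (List Char)) (n k : Nat) (hk : k < n) :
    ∀ r, r ≤ k → pvBGo inp n k r = (List.range (r + 1)).map (fun t => pvCh inp (r - t) (k - r + t)) := by
  intro r
  induction r with
  | zero => intro _; simp [pvBGo, pvCh, hk]
  | succ r ih =>
    intro hr
    rw [List.range_succ_eq_map, List.map_cons, List.map_map, pvBGo, if_pos (by omega),
      ih (by omega)]
    refine congrArg₂ _ rfl (List.map_congr_left ?_)
    intro t ht
    simp only [Function.comp]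
    congr 1 <;> omega

-- lower diagonals: walk stops when the column k - r reaches n
theorem pvBGo_lower (inp : List (List Char)) (n k : Nat) (hk : n ≤ k) :
    ∀ m r, r = k - n + m → r ≤ n - 1 →
      pvBGo inp n k r = (List.range m).map (fun t => pvCh inp (r - t) (k - r + t)) := by
  intro m
  induction m with
  | zero =>
    intro r hr _
    cases r with
    | zero => rw [pvBGo, if_neg (by omega)]; rfl
    | succ r' => rw [pvBGo, if_neg (by omega)]; rfl
  | succ m ih =>
    intro r hr hrn
    have hr1 : r = (r - 1) + 1 := by omega
    rw [hr1, pvBGo, if_pos (by omega)]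
    rw [← hr1, ih (r - 1) (by omega) (by omega),
      List.range_succ_eq_map, List.map_cons, List.map_map]
    refine congrArg₂ _ (by simp [pvCh]) (List.map_congr_left ?_)
    intro t ht
    simp only [Function.comp]
    congr 1 <;> omega

-- ----- A's loops -----

-- the state after A has processed outer iterations 0 .. i-1 (n ≥ 1, square grid):
-- upper diagonals < i and the last (min i (n-1)) lower diagonals are final, the rest still ""
def pvStageF (inp : List (List Char)) (n i k : Nat) : List Char :=
  if k < i ∨ 2 * n - 1 - min i (n - 1) ≤ k then pvBGo inp n k (min k (n - 1)) else []

def pvStage (inp : List (List Char)) (n i : Nat) : List (List Char) :=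
  (List.range (2 * n - 1)).map (pvStageF inp n i)

-- setting one entry of a mapped range
theorem pvMapRange_set {α : Type} (f : Nat → α) (L p : Nat) (v : α) (_hp : p < L) :
    ((List.range L).map f).set p v = (List.range L).map (fun k => if k = p then v else f k) := by
  apply List.ext_getElem (by simp)
  intro j h1 h2
  simp only [List.getElem_set, List.getElem_map, List.getElem_range]
  split_ifs with h h' h' <;> first | rfl | omega

theorem pvMapRange_getD {α : Type} (f : Nat → α) (L p : Nat) (d : α) (_hp : p < L) :
    ((List.range L).map f).getD p d = f p := by
  rw [List.getD_eq_getElem _ _ (by simp [_hp])]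
  simp

theorem pvMapRange_reverse {α : Type} (f : Nat → α) (m : Nat) :
    ((List.range m).map f).reverse = (List.range m).map (fun t => f (m - 1 - t)) := by
  apply List.ext_getElem (by simp)
  intro j h1 h2
  simp only [List.getElem_reverse, List.getElem_map, List.getElem_range, List.length_map,
    List.length_range]

-- pyGetD at an in-range negative index, getD form
theorem pvGetD_neg {α : Type} (xs : List α) (k : Nat) (d : α) (h1 : 0 < k) (h2 : k ≤ xs.length) :
    PySem.List.pyGetD xs (-(k : Int)) d = xs.getD (xs.length - k) d := by
  unfold PySem.List.pyGetD PySem.List.pyGet? PySem.List.pyIdx?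
  split_ifs with h h'
  all_goals first
   | (exfalso; omega)
   | (simp only [List.getD, neg_neg, Int.toNat_natCast, Option.bind]; try rfl)

theorem pvGetD_set_ne {α : Type} (xs : List α) (p q : Nat) (a d : α) (h : p ≠ q) :
    (xs.set p a).getD q d = xs.getD q d := by
  simp [List.getD, List.getElem?_set_ne h]

theorem pvGetD_set_self {α : Type} (xs : List α) (p : Nat) (a d : α) (h : p < xs.length) :
    (xs.set p a).getD p d = a := by
  simp [List.getD, h]

-- one pass of A's inner while body, two-index version (i < n-1), in List.set form
theorem pvAStep_two (inp : List (List Char)) (n i : Nat) (hn : inp.length = n)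
    (hsq : ∀ row ∈ inp, row.length = n) (hi : i < n - 1)
    (acc : List (List Char)) (hlen : acc.length = 2 * n - 1) (t : Nat) (ht : t ≤ i) :
    pvAStep inp n i acc t =
      (acc.set i (acc.getD i [] ++ [pvCh inp (i - t) t])).set (2 * n - 2 - i)
        ((acc.set i (acc.getD i [] ++ [pvCh inp (i - t) t])).getD (2 * n - 2 - i) [] ++
          [pvCh inp (n - 1 - i + t) (n - 1 - t)]) := by
  have hn2 : 2 ≤ n := by omega
  have e1 : pvGetCh inp ((i : Int) - (t : Int)) ((i : Int) - ((i : Int) - (t : Int))) =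
      pvCh inp (i - t) t :=
    pvGetCh_eq inp n hn hsq _ _ (i - t) t (by omega) (by omega) (Or.inl (by omega))
      (Or.inl (by omega))
  have e2 : pvGetCh inp (-1 - (i : Int) + (t : Int))
      ((-1 - (i : Int) - 1) - (-1 - (i : Int) + (t : Int))) =
      pvCh inp (n - 1 - i + t) (n - 1 - t) :=
    pvGetCh_eq inp n hn hsq _ _ (n - 1 - i + t) (n - 1 - t) (by omega) (by omega)
      (Or.inr (by omega)) (Or.inr (by omega))
  simp only [pvAStep]
  rw [if_pos hi, e1, e2]
  rw [PySem.List.pySetD_natCast, PySem.List.pyGetD_natCast]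
  have hidx : (-1 - (i : Int)) = -(((i + 1 : Nat)) : Int) := by push_cast; ring
  have hlen' : (acc.set i (acc.getD i [] ++ [pvCh inp (i - t) t])).length = 2 * n - 1 := by
    simp [hlen]
  rw [hidx, pvSetD_neg _ _ _ (by omega) (by omega),
    pvGetD_neg _ _ _ (by omega) (by omega), hlen']
  have h2 : 2 * n - 1 - (i + 1) = 2 * n - 2 - i := by omega
  rw [h2]

-- one pass of A's inner while body when i = n-1 (no lower-diagonal write)
theorem pvAStep_one (inp : List (List Char)) (n i : Nat) (hn : inp.length = n)
    (hsq : ∀ row ∈ inp, row.length = n) (hi : ¬ i < n - 1) (hi' : i < n)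
    (acc : List (List Char)) (t : Nat) (ht : t ≤ i) :
    pvAStep inp n i acc t = acc.set i (acc.getD i [] ++ [pvCh inp (i - t) t]) := by
  have e1 : pvGetCh inp ((i : Int) - (t : Int)) ((i : Int) - ((i : Int) - (t : Int))) =
      pvCh inp (i - t) t :=
    pvGetCh_eq inp n hn hsq _ _ (i - t) t (by omega) (by omega) (Or.inl (by omega))
      (Or.inl (by omega))
  simp only [pvAStep]
  rw [if_neg hi, e1, PySem.List.pySetD_natCast, PySem.List.pyGetD_natCast]

-- inner while loop, two-index version (i < n-1)
theorem pvFoldA_two (inp : List (List Char)) (n i : Nat) (hn : inp.length = n)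
    (hsq : ∀ row ∈ inp, row.length = n) (hi : i < n - 1)
    (out : List (List Char)) (hlen : out.length = 2 * n - 1) :
    ∀ m, m ≤ i + 1 →
      (List.range m).foldl (pvAStep inp n i) out =
        (out.set i (out.getD i [] ++ (List.range m).map (fun t => pvCh inp (i - t) t))).set
          (2 * n - 2 - i)
          (out.getD (2 * n - 2 - i) [] ++
            (List.range m).map (fun t => pvCh inp (n - 1 - i + t) (n - 1 - t))) := by
  have hq : i ≠ 2 * n - 2 - i := by omega
  have hil : i < out.length := by omega
  have hql : 2 * n - 2 - i < out.length := by omega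
  intro m
  induction m with
  | zero =>
    intro _
    simp only [List.range_zero, List.foldl_nil, List.map_nil, List.append_nil]
    rw [List.getD_eq_getElem _ _ hil, List.set_getElem_self hil,
      List.getD_eq_getElem _ _ hql, List.set_getElem_self hql]
  | succ m ih =>
    intro hm
    rw [List.range_succ, List.foldl_append, List.foldl_cons, List.foldl_nil, ih (by omega),
      pvAStep_two inp n i hn hsq hi _ (by simp [hlen]) m (by omega)]
    rw [pvGetD_set_ne _ _ _ _ _ (Ne.symm hq), pvGetD_set_self _ _ _ _ (by simpa using hil)]
    rw [List.set_comm _ _ (Ne.symm hq), List.set_set]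
    rw [pvGetD_set_self _ _ _ _ (by simpa using hql)]
    rw [List.set_set]
    simp [List.map_append, List.append_assoc]

-- inner while loop, single-index version (i = n-1)
theorem pvFoldA_one (inp : List (List Char)) (n i : Nat) (hn : inp.length = n)
    (hsq : ∀ row ∈ inp, row.length = n) (hi : i = n - 1) (hn1 : 1 ≤ n)
    (out : List (List Char)) (hlen : out.length = 2 * n - 1) :
    ∀ m, m ≤ i + 1 →
      (List.range m).foldl (pvAStep inp n i) out =
        out.set i (out.getD i [] ++ (List.range m).map (fun t => pvCh inp (i - t) t)) := by
  have hil : i < out.length := by omega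
  intro m
  induction m with
  | zero =>
    intro _
    simp only [List.range_zero, List.foldl_nil, List.map_nil, List.append_nil]
    rw [List.getD_eq_getElem _ _ hil, List.set_getElem_self hil]
  | succ m ih =>
    intro hm
    rw [List.range_succ, List.foldl_append, List.foldl_cons, List.foldl_nil, ih (by omega),
      pvAStep_one inp n i hn hsq (by omega) (by omega) _ m (by omega)]
    rw [pvGetD_set_self _ _ _ _ (by simpa using hil), List.set_set]
    simp [List.map_append, List.append_assoc]

-- one outer iteration advances the stage
theorem pvOuter_step (inp : List (List Char)) (n i : Nat) (hn : inp.length = n)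
    (hsq : ∀ row ∈ inp, row.length = n) (hi : i < n) :
    pvAOuter inp n (pvStage inp n i) i = pvStage inp n (i + 1) := by
  have hL : (pvStage inp n i).length = 2 * n - 1 := by simp [pvStage]
  by_cases hi2 : i < n - 1
  · have hn2 : 2 ≤ n := by omega
    have hq : i ≠ 2 * n - 2 - i := by omega
    have hqlt : 2 * n - 2 - i < 2 * n - 1 := by omega
    have hilt : i < 2 * n - 1 := by omega
    have hgi : (pvStage inp n i).getD i [] = [] := by
      rw [pvStage, pvMapRange_getD _ _ _ _ hilt, pvStageF, if_neg (by omega)]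
    have hgq : (pvStage inp n i).getD (2 * n - 2 - i) [] = [] := by
      rw [pvStage, pvMapRange_getD _ _ _ _ hqlt, pvStageF, if_neg (by omega)]
    simp only [pvAOuter]
    rw [if_pos hi2, pvFoldA_two inp n i hn hsq hi2 _ hL (i + 1) le_rfl, hgi, hgq,
      List.nil_append, List.nil_append]
    have hidx : (-1 - (i : Int)) = -(((i + 1 : Nat)) : Int) := by push_cast; ring
    rw [hidx, pvSetD_neg _ _ _ (by omega) (by simp only [List.length_set, hL]; omega),
      pvGetD_neg _ _ _ (by omega) (by simp only [List.length_set, hL]; omega)]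
    simp only [List.length_set, hL]
    have h2 : 2 * n - 1 - (i + 1) = 2 * n - 2 - i := by omega
    rw [h2, pvGetD_set_self _ _ _ _ (by simp only [List.length_set, hL]; omega),
      List.set_set, pvMapRange_reverse]
    rw [pvStage, pvMapRange_set _ _ _ _ hilt, pvMapRange_set _ _ _ _ hqlt, pvStage]
    apply List.map_congr_left
    intro k hk
    simp only [List.mem_range] at hk
    by_cases hkq : k = 2 * n - 2 - i
    · rw [if_pos hkq, hkq, pvStageF, if_pos (by omega)]
      have hmin : min (2 * n - 2 - i) (n - 1) = n - 1 := by omega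
      rw [hmin, pvBGo_lower inp n (2 * n - 2 - i) (by omega) (i + 1) (n - 1) (by omega) le_rfl]
      apply List.map_congr_left
      intro t ht
      simp only [List.mem_range] at ht
      unfold pvCh
      congr 2 <;> omega
    · rw [if_neg hkq]
      by_cases hki : k = i
      · rw [if_pos hki, hki, pvStageF, if_pos (by omega)]
        have hmin : min i (n - 1) = i := by omega
        rw [hmin, pvBGo_upper inp n i (by omega) i le_rfl]
        apply List.map_congr_left
        intro t ht
        simp only [List.mem_range] at ht
        unfold pvCh
        congr 2 <;> omega
      · rw [if_neg hki]
        unfold pvStageF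
        split_ifs with h1 h2 h2 <;> first | rfl | omega
  · have hieq : i = n - 1 := by omega
    have hn1 : 1 ≤ n := by omega
    have hilt : i < 2 * n - 1 := by omega
    have hgi : (pvStage inp n i).getD i [] = [] := by
      rw [pvStage, pvMapRange_getD _ _ _ _ hilt, pvStageF, if_neg (by omega)]
    simp only [pvAOuter]
    rw [if_neg hi2, pvFoldA_one inp n i hn hsq hieq hn1 _ hL (i + 1) le_rfl, hgi,
      List.nil_append]
    rw [pvStage, pvMapRange_set _ _ _ _ hilt, pvStage]
    apply List.map_congr_left
    intro k hk
    simp only [List.mem_range] at hk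
    by_cases hki : k = i
    · rw [if_pos hki, hki, pvStageF, if_pos (by omega)]
      have hmin : min i (n - 1) = i := by omega
      rw [hmin, pvBGo_upper inp n i (by omega) i le_rfl]
      apply List.map_congr_left
      intro t ht
      simp only [List.mem_range] at ht
      unfold pvCh
      congr 2 <;> omega
    · rw [if_neg hki]
      unfold pvStageF
      split_ifs with h1 h2 h2 <;> first | rfl | omega

theorem pvOuter_fold (inp : List (List Char)) (n : Nat) (hn : inp.length = n)
    (hsq : ∀ row ∈ inp, row.length = n) (hn1 : 1 ≤ n) :
    ∀ i, i ≤ n →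
      (List.range i).foldl (pvAOuter inp n) ((List.range (2 * n - 1)).map (fun _ => [])) =
        pvStage inp n i := by
  intro i
  induction i with
  | zero =>
    intro _
    simp only [List.range_zero, List.foldl_nil, pvStage]
    apply List.map_congr_left
    intro k hk
    simp only [List.mem_range] at hk
    rw [pvStageF, if_neg (by omega)]
  | succ i ih =>
    intro hi
    rw [List.range_succ, List.foldl_append, List.foldl_cons, List.foldl_nil, ih (by omega),
      pvOuter_step inp n i hn hsq (by omega)]

theorem rotate_string_list_45_spec : Claim_equal_rotate_string_list_45 := by
  intro input _ hpre
  unfold Spec_rotate_string_list_45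
  match input with
  | [] => rfl
  | [s] =>
    simp [rotate_string_list_45, rotate_string_list_45_alt, pvAOuter, pvAStep, pvBGo,
      pvGetCh, List.range_succ, PySem.List.pySetD_of_nonneg, PySem.List.pyGetD_zero,
      List.getD]
  | s₀ :: s₁ :: rest =>
    have hpre' : ∀ s ∈ s₀ :: s₁ :: rest, s.toList.length = (s₀ :: s₁ :: rest).length := by
      rw [Pre_rotate_string_list_45, if_neg (by simp)] at hpre
      exact hpre
    clear hpre
    generalize hin : s₀ :: s₁ :: rest = input at hpre'
    simp only [rotate_string_list_45, rotate_string_list_45_alt]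
    have hn1 : 1 ≤ input.length := by rw [← hin]; simp
    have hn : (input.map String.toList).length = input.length := by simp
    have hsq : ∀ row ∈ input.map String.toList, row.length = input.length := by
      intro row hrow
      simp only [List.mem_map] at hrow
      obtain ⟨s, hs, rfl⟩ := hrow
      exact hpre' s hs
    rw [pvOuter_fold _ _ hn hsq hn1 input.length le_rfl, pvStage, List.map_map]
    apply List.map_congr_left
    intro k hk
    simp only [List.mem_range] at hk
    simp only [Function.comp, pvStageF, if_pos (by omega :
      k < input.length ∨
        2 * input.length - 1 - min input.length (input.length - 1) ≤ k)]
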